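-- pv_equiv track=rewrite | github.com/alisaalisaalisaalisas/LLM_SuperCLI | llm_supercli/llm_supercli/rich_ui/content_parser.py | _is_partial_think_tag
-- ===== SOURCE A (Python) =====
-- def _is_partial_think_tag(text: str) -> bool:
--     """Check if text could be the start of a <think> or </think> tag.
--
--     Used to detect partial tags at the end of streaming content.
--     """
--     think_open = '<think>'
--     think_close = '</think>'
--
--     # Check if text is a prefix of either tag
--     for tag in [think_open, think_close]:
--         for length in range(1, len(tag)):
--             if text.startswith(tag[:length]) and len(text) <= length:
--                 return True
--
--     return False
-- ===== SOURCE B (Python) =====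
-- def _is_partial_think_tag(text: str) -> bool:
--     """Check if text could be the start of a <think> or </think> tag.
--
--     Parse structurally: a partial tag is '<', an optional '/', then a proper
--     prefix of 'think>' (the remainder must be a prefix of 'think>' that does
--     not yet reach the closing '>').
--     """
--     if not text or text[0] != '<':
--         return False
--     body = text[1:]
--     if body.startswith('/'):
--         body = body[1:]
--     return 'think>'.startswith(body) and not body.endswith('>')
-- ===== Notes on version B (the rewrite author's own statement) =====
-- stated objective: simpler
-- what changed: Replaces A's nested scan over the two tags and all prefix lengths with a structural parse: consume '<', an optional '/', and accept iff the remainder is a prefix of 'think>' that does not yet contain the closing '>'.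
import Mathlib
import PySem

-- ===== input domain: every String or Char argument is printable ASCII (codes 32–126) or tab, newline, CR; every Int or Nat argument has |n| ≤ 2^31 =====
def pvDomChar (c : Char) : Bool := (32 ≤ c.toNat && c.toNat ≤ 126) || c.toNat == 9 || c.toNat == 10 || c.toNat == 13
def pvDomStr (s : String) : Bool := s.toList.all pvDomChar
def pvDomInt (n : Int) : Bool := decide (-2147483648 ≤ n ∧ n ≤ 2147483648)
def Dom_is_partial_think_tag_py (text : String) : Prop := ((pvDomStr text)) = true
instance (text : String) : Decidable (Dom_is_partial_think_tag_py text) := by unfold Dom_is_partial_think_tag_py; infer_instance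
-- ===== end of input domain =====

-- B parses the input structurally ('<', optional '/', then a proper prefix of "think>")
-- instead of A's nested scan over the two tags and all prefix lengths (objective: simpler).

-- ===== PORT A =====
def is_partial_think_tag_py (text : String) : Bool :=
  let think_open := "<think>"
  let think_close := "</think>"
  [think_open, think_close].any (fun tag =>
    (PySem.List.pyRange 1 (PySem.Str.len tag) 1).any (fun length =>
      PySem.Str.startswith text (PySem.Str.slice tag none (some length)) &&
        decide (PySem.Str.len text ≤ length)))

-- ===== PORT B =====
def is_partial_think_tag_py_alt (text : String) : Bool :=
  if PySem.Str.len text == 0 || !(PySem.Str.pyGet? text 0 == some '<') then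
    false
  else
    let body := PySem.Str.slice text (some 1) none
    let body := if PySem.Str.startswith body "/" then PySem.Str.slice body (some 1) none else body
    PySem.Str.startswith "think>" body && !(PySem.Str.endswith body ">")

-- ===== PRECONDITION & SPEC =====
def Spec_is_partial_think_tag_py (text : String) (out : Bool) : Prop := out = is_partial_think_tag_py_alt text
instance (text : String) (out : Bool) : Decidable (Spec_is_partial_think_tag_py text out) := by unfold Spec_is_partial_think_tag_py; infer_instance

-- ===== CLAIM (what is proved, stated in full; the proofs are below) =====
def Claim_equal_is_partial_think_tag_py : Prop := ∀ (text : String), Dom_is_partial_think_tag_py text → Spec_is_partial_think_tag_py text (is_partial_think_tag_py text)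

-- ===== LEMMAS AND PROOFS =====

-- the twelve non-empty proper prefixes of the two tags
def pvL : List String :=
  ["<", "<t", "<th", "<thi", "<thin", "<think",
   "</", "</t", "</th", "</thi", "</thin", "</think"]

-- "text starts with p and len(text) ≤ len(p)" is exactly "text = p"
lemma pv_key (text p : String) (n : Int) (hn : PySem.Str.len p = n) :
    (PySem.Str.startswith text p && decide (PySem.Str.len text ≤ n)) = (text == p) := by
  subst hn
  by_cases h : text = p
  · subst h
    simp [PySem.Str.startswith_eq, PySem.Chars.startswith_iff]
  · have hne : (text == p) = false := by simp [h]
    rw [hne]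
    cases hs : PySem.Str.startswith text p with
    | false => simp
    | true =>
      have hp : p.toList <+: text.toList := by
        rw [PySem.Str.startswith_eq] at hs
        exact (PySem.Chars.startswith_iff _ _).mp hs
      have hnle : ¬ PySem.Str.len text ≤ PySem.Str.len p := by
        intro hle
        rw [PySem.Str.len_eq, PySem.Str.len_eq] at hle
        have heq : p.toList.length = text.toList.length := by
          have := hp.length_le
          omega
        have hl := hp.eq_of_length heq
        exact h (String.toList_injective hl.symm)
      rw [Bool.true_and, decide_eq_false hnle]

-- A returns true exactly on the twelve prefixes
lemma pv_A_char (text : String) :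
    is_partial_think_tag_py text = decide (text ∈ pvL) := by
  simp only [is_partial_think_tag_py, List.any_cons, List.any_nil, Bool.or_false]
  rw [show PySem.List.pyRange 1 (PySem.Str.len "<think>") 1 = [1, 2, 3, 4, 5, 6] from by decide,
      show PySem.List.pyRange 1 (PySem.Str.len "</think>") 1 = [1, 2, 3, 4, 5, 6, 7] from by decide]
  simp only [List.any_cons, List.any_nil, Bool.or_false]
  rw [show PySem.Str.slice "<think>" none (some 1) = "<" from by decide,
      show PySem.Str.slice "<think>" none (some 2) = "<t" from by decide,
      show PySem.Str.slice "<think>" none (some 3) = "<th" from by decide,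
      show PySem.Str.slice "<think>" none (some 4) = "<thi" from by decide,
      show PySem.Str.slice "<think>" none (some 5) = "<thin" from by decide,
      show PySem.Str.slice "<think>" none (some 6) = "<think" from by decide,
      show PySem.Str.slice "</think>" none (some 1) = "<" from by decide,
      show PySem.Str.slice "</think>" none (some 2) = "</" from by decide,
      show PySem.Str.slice "</think>" none (some 3) = "</t" from by decide,
      show PySem.Str.slice "</think>" none (some 4) = "</th" from by decide,
      show PySem.Str.slice "</think>" none (some 5) = "</thi" from by decide,
      show PySem.Str.slice "</think>" none (some 6) = "</thin" from by decide,
      show PySem.Str.slice "</think>" none (some 7) = "</think" from by decide]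
  rw [pv_key text "<" 1 (by decide), pv_key text "<t" 2 (by decide),
      pv_key text "<th" 3 (by decide), pv_key text "<thi" 4 (by decide),
      pv_key text "<thin" 5 (by decide), pv_key text "<think" 6 (by decide),
      pv_key text "</" 2 (by decide), pv_key text "</t" 3 (by decide),
      pv_key text "</th" 4 (by decide), pv_key text "</thi" 5 (by decide),
      pv_key text "</thin" 6 (by decide), pv_key text "</think" 7 (by decide)]
  rw [Bool.eq_iff_iff]
  simp only [Bool.or_eq_true, beq_iff_eq, decide_eq_true_eq, pvL,
    List.mem_cons, List.not_mem_nil, or_false]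
  tauto

-- every prefix of "think>" is one of its seven initial segments
lemma pv_prefix_enum (l : List Char) (h : l <+: ['t','h','i','n','k','>']) :
    l = [] ∨ l = ['t'] ∨ l = ['t','h'] ∨ l = ['t','h','i'] ∨ l = ['t','h','i','n'] ∨
      l = ['t','h','i','n','k'] ∨ l = ['t','h','i','n','k','>'] := by
  have hl : l.length ≤ 6 := by simpa using h.length_le
  have he : l = (['t','h','i','n','k','>'] : List Char).take l.length :=
    List.prefix_iff_eq_take.mp h
  interval_cases hlen : l.length <;> simp_all

-- B returns true exactly on the twelve prefixes
lemma pv_B_char (text : String) :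
    is_partial_think_tag_py_alt text = decide (text ∈ pvL) := by
  rw [Bool.eq_iff_iff, decide_eq_true_iff]
  constructor
  · intro h
    rcases hl : text.toList with _ | ⟨c, r⟩
    · have ht : text = "" := String.toList_injective (by rw [hl]; decide)
      rw [ht] at h
      simp [is_partial_think_tag_py_alt] at h
    · by_cases hc : c = '<'
      swap
      · exfalso
        unfold is_partial_think_tag_py_alt at h
        rw [if_pos (by simp [hl, hc])] at h
        exact Bool.false_ne_true h
      · subst hc
        unfold is_partial_think_tag_py_alt at h
        rw [if_neg (by
          simp
          refine ⟨fun h0 => ?_, by simp [hl]⟩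
          rw [h0] at hl
          simp at hl)] at h
        have hS1 : (PySem.Str.slice text (some 1) none).toList = r := by
          simp [hl, PySem.List.slice_from_one]
        change (PySem.Str.startswith "think>"
              (if PySem.Str.startswith (PySem.Str.slice text (some 1) none) "/" = true then
                PySem.Str.slice (PySem.Str.slice text (some 1) none) (some 1) none
              else PySem.Str.slice text (some 1) none) &&
            !PySem.Str.endswith
              (if PySem.Str.startswith (PySem.Str.slice text (some 1) none) "/" = true then
                PySem.Str.slice (PySem.Str.slice text (some 1) none) (some 1) none
              else PySem.Str.slice text (some 1) none) ">") = true at h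
        split_ifs at h with hs
        · -- body starts with '/': the '</…' family
          have hpre : ['/'] <+: r := by
            rw [PySem.Str.startswith_eq] at hs
            have := (PySem.Chars.startswith_iff _ _).mp hs
            rw [hS1] at this
            simpa using this
          rcases r with _ | ⟨c2, r2⟩
          · exact absurd hpre (by decide)
          · obtain ⟨rfl, -⟩ := List.cons_prefix_cons.mp hpre
            obtain ⟨h1, h2⟩ := Bool.and_eq_true_iff.mp h
            have hS2 : (PySem.Str.slice (PySem.Str.slice text (some 1) none) (some 1) none).toList = r2 := by
              simp [hS1, PySem.List.slice_from_one]
            have h1' : r2 <+: ['t','h','i','n','k','>'] := by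
              rw [PySem.Str.startswith_eq] at h1
              have := (PySem.Chars.startswith_iff _ _).mp h1
              rw [hS2] at this
              simpa using this
            have h2' : ¬ (['>'] <:+ r2) := by
              intro hsuf
              have he : PySem.Str.endswith
                  (PySem.Str.slice (PySem.Str.slice text (some 1) none) (some 1) none) ">" = true := by
                rw [PySem.Str.endswith_eq]
                refine (PySem.Chars.endswith_iff _ _).mpr ?_
                rw [hS2]
                simpa using hsuf
              rw [he] at h2
              simp at h2
            rcases pv_prefix_enum r2 h1' with rfl | rfl | rfl | rfl | rfl | rfl | rfl
            · have ht : text = "</" := String.toList_injective (by rw [hl]; decide)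
              rw [ht]; decide
            · have ht : text = "</t" := String.toList_injective (by rw [hl]; decide)
              rw [ht]; decide
            · have ht : text = "</th" := String.toList_injective (by rw [hl]; decide)
              rw [ht]; decide
            · have ht : text = "</thi" := String.toList_injective (by rw [hl]; decide)
              rw [ht]; decide
            · have ht : text = "</thin" := String.toList_injective (by rw [hl]; decide)
              rw [ht]; decide
            · have ht : text = "</think" := String.toList_injective (by rw [hl]; decide)
              rw [ht]; decide
            · exact absurd (by decide) h2'
        · -- no '/': the '<…' family
          obtain ⟨h1, h2⟩ := Bool.and_eq_true_iff.mp h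
          have h1' : r <+: ['t','h','i','n','k','>'] := by
            rw [PySem.Str.startswith_eq] at h1
            have := (PySem.Chars.startswith_iff _ _).mp h1
            rw [hS1] at this
            simpa using this
          have h2' : ¬ (['>'] <:+ r) := by
            intro hsuf
            have he : PySem.Str.endswith (PySem.Str.slice text (some 1) none) ">" = true := by
              rw [PySem.Str.endswith_eq]
              refine (PySem.Chars.endswith_iff _ _).mpr ?_
              rw [hS1]
              simpa using hsuf
            rw [he] at h2
            simp at h2
          rcases pv_prefix_enum r h1' with rfl | rfl | rfl | rfl | rfl | rfl | rfl
          · have ht : text = "<" := String.toList_injective (by rw [hl]; decide)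
            rw [ht]; decide
          · have ht : text = "<t" := String.toList_injective (by rw [hl]; decide)
            rw [ht]; decide
          · have ht : text = "<th" := String.toList_injective (by rw [hl]; decide)
            rw [ht]; decide
          · have ht : text = "<thi" := String.toList_injective (by rw [hl]; decide)
            rw [ht]; decide
          · have ht : text = "<thin" := String.toList_injective (by rw [hl]; decide)
            rw [ht]; decide
          · have ht : text = "<think" := String.toList_injective (by rw [hl]; decide)
            rw [ht]; decide
          · exact absurd (by decide) h2'
  · intro h
    simp only [pvL, List.mem_cons, List.not_mem_nil, or_false] at h
    rcases h with rfl | rfl | rfl | rfl | rfl | rfl | rfl | rfl | rfl | rfl | rfl | rfl <;> decide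

-- ===== VERDICT (by name: the statement is the Claim_ definition above) =====
theorem is_partial_think_tag_py_spec : Claim_equal_is_partial_think_tag_py := by
  intro text _
  unfold Spec_is_partial_think_tag_py
  rw [pv_A_char, pv_B_char]
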